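-- pv_equiv track=rewrite | github.com/pypi-data/pypi-mirror-10 | packages/BenchExec/BenchExec-0.5.tar.gz/BenchExec-0.5/benchexec/tools/ultimateautomizer.py | get_value_from_output
-- ===== SOURCE A (Python) =====
-- def get_value_from_output(output, column):
--     # search for the text in output and get its value,
--     value = None # default value
--     for line in output:
--         if line.startswith(column + ':'):
--             searchtext = column + ':'
--             startPosition = line.find(searchtext) + len(searchtext)
--             value = line[startPosition:].strip()
--     return value
-- ===== SOURCE B (Python) =====
-- def get_value_from_output(output, column):
--     # Scan backwards and return on the first match: the last matching line wins,
--     # without overwriting a variable across a full forward pass.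
--     prefix = column + ':'
--     for line in reversed(list(output)):
--         if line.startswith(prefix):
--             return line[len(prefix):].strip()
--     return None
-- ===== Notes on version B (the rewrite author's own statement) =====
-- stated objective: faster
-- what changed: B scans the lines in reverse and returns on the first matching line (early return), instead of A's forward pass over every line that keeps overwriting the value and re-builds column+':' and re-runs str.find on every match; B slices directly at len(column)+1.
import Mathlib
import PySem

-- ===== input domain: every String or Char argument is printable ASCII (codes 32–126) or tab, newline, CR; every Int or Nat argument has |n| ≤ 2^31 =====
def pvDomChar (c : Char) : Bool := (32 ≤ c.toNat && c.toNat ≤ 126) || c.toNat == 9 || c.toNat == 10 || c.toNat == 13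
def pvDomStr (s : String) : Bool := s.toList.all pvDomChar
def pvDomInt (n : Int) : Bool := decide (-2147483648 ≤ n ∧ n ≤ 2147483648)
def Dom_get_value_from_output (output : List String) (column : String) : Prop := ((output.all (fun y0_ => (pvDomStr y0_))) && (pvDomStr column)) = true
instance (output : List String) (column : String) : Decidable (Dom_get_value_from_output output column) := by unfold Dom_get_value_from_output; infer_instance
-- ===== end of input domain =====

-- B scans the lines in reverse and returns on the first matching line, instead of A's
-- forward pass that overwrites the value on every match (objective: simpler).

-- ===== PORT A =====
-- literal port of A: forward fold, last match overwrites; uses str.find + len to slice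
def get_value_from_output (output : List String) (column : String) : Option String :=
  output.foldl
    (fun value line =>
      if PySem.Chars.startswith line.toList (column.toList ++ [':']) then
        let searchtext := column.toList ++ [':']
        let startPosition :=
          PySem.Chars.find line.toList searchtext + (searchtext.length : Int)
        some (String.ofList
          (PySem.Chars.strip (PySem.Chars.slice line.toList (some startPosition) none)))
      else value)
    none

-- ===== PORT B =====
-- helper: first matching line of the (already reversed) list, early return
def gvfoRevScan (lines : List String) (pre : List Char) : Option String :=
  match lines with
  | [] => none
  | line :: rest =>
    if PySem.Chars.startswith line.toList pre then
      some (String.ofList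
        (PySem.Chars.strip (PySem.Chars.slice line.toList (some (pre.length : Int)) none)))
    else gvfoRevScan rest pre

def get_value_from_output_alt (output : List String) (column : String) : Option String :=
  gvfoRevScan output.reverse (column.toList ++ [':'])

-- ===== PRECONDITION & SPEC =====
def Spec_get_value_from_output (output : List String) (column : String) (out : Option String) : Prop := out = get_value_from_output_alt output column
instance (output : List String) (column : String) (out : Option String) : Decidable (Spec_get_value_from_output output column out) := by unfold Spec_get_value_from_output; infer_instance

-- ===== CLAIM (what is proved, stated in full; the proofs are below) =====
def Claim_equal_get_value_from_output : Prop := ∀ (output : List String) (column : String), Dom_get_value_from_output output column → Spec_get_value_from_output output column (get_value_from_output output column)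

-- ===== LEMMAS AND PROOFS =====

-- if p is a prefix of s, its first occurrence is at index 0
theorem pv_find_of_prefix (s p : List Char) (hp : p <+: s) :
    PySem.Chars.find s p = 0 := by
  have hne : PySem.Chars.find s p ≠ -1 :=
    (PySem.Chars.find_ne_neg_one_iff s p).mpr hp.isInfix
  have h0 : PySem.Chars.findFrom s p 0 none = PySem.Chars.find s p :=
    PySem.Chars.findFrom_zero s p
  have hspec := PySem.Chars.findFrom_natCast_spec s p 0 (Nat.zero_le _)
    (by simpa [h0] using hne)
  simp only [Nat.cast_zero, h0] at hspec
  obtain ⟨hle, -, hmin⟩ := hspec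
  by_contra hne0
  have hpos : 0 < (PySem.Chars.find s p).toNat := by omega
  exact hmin 0 (Nat.zero_le _) hpos (by simpa using hp)

-- on a matching line, A's extraction equals B's extraction
theorem pv_extract_eq (line : String) (p : List Char)
    (h : PySem.Chars.startswith line.toList p = true) :
    String.ofList (PySem.Chars.strip
        (PySem.Chars.slice line.toList
          (some (PySem.Chars.find line.toList p + (p.length : Int))) none))
      = String.ofList (PySem.Chars.strip
        (PySem.Chars.slice line.toList (some (p.length : Int)) none)) := by
  have hp : p <+: line.toList := (PySem.Chars.startswith_iff line.toList p).mp h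
  rw [pv_find_of_prefix line.toList p hp, zero_add]

-- the forward fold with overwriting equals (reverse first-match) <|> init
theorem pv_fold_eq_revScan (p : List Char) (l : List String) (v : Option String) :
    l.foldl
      (fun value line =>
        if PySem.Chars.startswith line.toList p then
          some (String.ofList (PySem.Chars.strip
            (PySem.Chars.slice line.toList
              (some (PySem.Chars.find line.toList p + (p.length : Int))) none)))
        else value) v
    = (gvfoRevScan l.reverse p).orElse (fun _ => v) := by
  induction l using List.reverseRecOn generalizing v with
  | nil => simp [gvfoRevScan]
  | append_singleton l x ih =>
    rw [List.foldl_append, List.foldl_cons, List.foldl_nil, List.reverse_append,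
      List.reverse_singleton, List.singleton_append]
    by_cases hx : PySem.Chars.startswith x.toList p = true
    · rw [if_pos hx, pv_extract_eq x p hx]
      simp [gvfoRevScan, hx, Option.orElse]
    · rw [if_neg hx]
      simp only [gvfoRevScan, hx, if_neg, Bool.false_eq_true, ite_false]
      exact ih v

-- ===== VERDICT (by name: the statement is the Claim_ definition above) =====
theorem get_value_from_output_spec : Claim_equal_get_value_from_output := by
  intro output column _
  unfold Spec_get_value_from_output get_value_from_output get_value_from_output_alt
  rw [pv_fold_eq_revScan]
  cases gvfoRevScan output.reverse (column.toList ++ [':']) <;> rfl
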